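-- pv_equiv track=rewrite | github.com/ephemient/aoc2022 | py/aoc2022/day7.py | _parse
-- ===== SOURCE A (Python) =====
-- from collections import defaultdict
--
-- def _parse(lines):
--     cwd, sizes = "/", defaultdict(int)
--     for line in lines:
--         match line.split():
--             case ("$", "cd", "/"):
--                 cwd = "/"
--             case ("$", "cd", ".."):
--                 if "/" in cwd:
--                     cwd = cwd[: cwd.rindex("/")]
--             case ("$", "cd", path):
--                 cwd = f"{cwd}/{path}"
--             case (size, *_):
--                 try:
--                     size = int(size)
--                 except ValueError as _:
--                     continue
--                 path = cwd
--                 while True: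
--                     sizes[path] += size
--                     if path == "/":
--                         break
--                     path = path[: path.rindex("/")] or "/"
--     return sizes
-- ===== SOURCE B (Python) =====
-- def _parse(lines):
--     # pass 1: track cwd and accumulate each file's size into its OWN directory only
--     cwd, direct = "/", {}
--     for line in lines:
--         words = line.split()
--         if len(words) == 3 and words[0] == "$" and words[1] == "cd":
--             target = words[2]
--             if target == "/":
--                 cwd = "/"
--             elif target == "..":
--                 if "/" in cwd:
--                     cwd = cwd[: cwd.rindex("/")]
--             else:
--                 cwd = f"{cwd}/{target}"
--         elif words:
--             try:
--                 size = int(words[0])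
--             except ValueError:
--                 continue
--             direct[cwd] = direct.get(cwd, 0) + size
--     # pass 2: propagate each directory's direct total upward once, into all ancestors
--     totals = {}
--     for path, size in direct.items():
--         while True:
--             totals[path] = totals.get(path, 0) + size
--             if path == "/":
--                 break
--             path = path[: path.rindex("/")] or "/"
--     return totals
-- ===== Notes on version B (the rewrite author's own statement) =====
-- stated objective: alternative
-- what changed: B is two staged passes: pass 1 only accumulates each file's size into its own directory's entry of a 'direct' dict (no upward walk per file), pass 2 propagates each directory's direct total upward once into all ancestors; A instead walks the whole ancestor chain for every single file line.
import Mathlib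
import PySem

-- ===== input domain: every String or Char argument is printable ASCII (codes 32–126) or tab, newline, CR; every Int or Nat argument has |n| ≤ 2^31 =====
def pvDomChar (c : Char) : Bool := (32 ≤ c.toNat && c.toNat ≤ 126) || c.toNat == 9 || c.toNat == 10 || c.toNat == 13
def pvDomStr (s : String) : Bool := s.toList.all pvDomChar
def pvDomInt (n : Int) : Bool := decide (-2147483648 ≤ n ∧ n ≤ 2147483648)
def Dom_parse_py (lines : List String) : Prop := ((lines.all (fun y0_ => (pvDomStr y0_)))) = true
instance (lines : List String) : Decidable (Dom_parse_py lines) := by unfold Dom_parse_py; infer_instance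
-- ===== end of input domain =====

-- B replaces A's per-file upward walk by two staged passes: pass 1 accumulates each file's
-- size into its own directory only, pass 2 propagates each directory's total upward once.

-- ===== PORT A =====
-- shared tokenizer dispatch: the line classification both Pythons perform
-- (A via match/case, Source B via the equivalent if/elif chain on line.split())
inductive PvTok where
  | cd (t : String)
  | blank
  | file (sz : String)

def pvClass (words : List String) : PvTok :=
  match words with
  | ["$", "cd", t] => .cd t
  | [] => .blank
  | sz :: _ => .file sz

-- `path[: path.rindex("/")] or "/"` (identical expression in A's walk and Source B's pass 2)
def pvNext (path : List Char) : List Char :=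
  let p' := path.take (PySem.Chars.rfind path ['/']).toNat
  if p' = [] then ['/'] else p'

-- cwd update on a '$ cd t' line (textually the same in A and in Source B's pass 1)
def pvCd (cwd : List Char) (t : String) : List Char :=
  if t = "/" then ['/']
  else if t = ".." then
    (if PySem.Chars.isIn ['/'] cwd then cwd.take (PySem.Chars.rfind cwd ['/']).toNat else cwd)
  else cwd ++ '/' :: t.toList

-- A's inner 'while True' walk: add `size` to cwd and every ancestor, stripping at the last '/'.
-- Python raises ValueError when the path has no '/' (rindex); those inputs are outside
-- Pre_parse_py, so the `if h : _` guard only serves totality.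
def pvLoopA (size : Int) (path : List Char) (d : PySem.Dict String Int) : PySem.Dict String Int :=
  let d' := d.modify (String.ofList path) 0 (· + size)
  if path = ['/'] then d'
  else if h : (pvNext path).length < path.length then pvLoopA size (pvNext path) d' else d'
  termination_by path.length
  decreasing_by exact h

-- one iteration of A's `for line in lines`
def pvStepA (st : List Char × PySem.Dict String Int) (line : String) :
    List Char × PySem.Dict String Int :=
  match pvClass (PySem.Str.split₀ line) with
  | .cd t => (pvCd st.1 t, st.2)
  | .blank => st
  | .file sz =>
    match PySem.Int.ofStr? sz with
    | none => st
    | some n => (st.1, pvLoopA n st.1 st.2)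

def parse_py (lines : List String) : List (String × Int) :=
  (lines.foldl pvStepA (['/'], PySem.Dict.empty)).2.items

-- ===== PORT B =====
-- pass 1 iteration: track cwd, and add a file's size to its OWN directory's entry only
def pvStepB (st : List Char × PySem.Dict String Int) (line : String) :
    List Char × PySem.Dict String Int :=
  match pvClass (PySem.Str.split₀ line) with
  | .cd t => (pvCd st.1 t, st.2)
  | .blank => st
  | .file sz =>
    match PySem.Int.ofStr? sz with
    | none => st
    | some n =>
      (st.1, st.2.insert (String.ofList st.1) (st.2.getD (String.ofList st.1) 0 + n))

-- Source B's pass-2 'while True' walk (same totality guard as pvLoopA)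
def pvLoopB (size : Int) (path : List Char) (d : PySem.Dict String Int) : PySem.Dict String Int :=
  let d' := d.insert (String.ofList path) (d.getD (String.ofList path) 0 + size)
  if path = ['/'] then d'
  else if h : (pvNext path).length < path.length then pvLoopB size (pvNext path) d' else d'
  termination_by path.length
  decreasing_by exact h

def parse_py_alt (lines : List String) : List (String × Int) :=
  ((lines.foldl pvStepB (['/'], PySem.Dict.empty)).2.items.foldl
    (fun t e => pvLoopB e.2 e.1.toList t) PySem.Dict.empty).items

-- ===== PRECONDITION & SPEC =====
-- pvPreOk tracks the one abstraction of A's cwd that matters: the number of '/' characters in it.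
-- A size line while that count is 0 (cwd is the empty string, reachable only by 'cd ..' at the
-- root) makes A's ''.rindex('/') raise ValueError (and B's pass 2 raises on that same stored
-- key); Pre_parse_py excludes exactly those inputs.
def pvPreOk (k : Nat) : List String → Bool
  | [] => true
  | line :: rest =>
    match pvClass (PySem.Str.split₀ line) with
    | .cd t =>
      if t = "/" then pvPreOk 1 rest
      else if t = ".." then pvPreOk (k - 1) rest
      else pvPreOk (k + 1 + t.toList.count '/') rest
    | .blank => pvPreOk k rest
    | .file sz =>
      match PySem.Int.ofStr? sz with
      | none => pvPreOk k rest
      | some _ => (k != 0) && pvPreOk k rest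

def Pre_parse_py (lines : List String) : Prop := pvPreOk 1 lines = true
instance (lines : List String) : Decidable (Pre_parse_py lines) := by
  unfold Pre_parse_py; infer_instance

def pvWitness_parse_py : List String := ["$ cd a", "$ cd b", "100 f.txt", "$ cd ..", "7 g"]

def Spec_parse_py (lines : List String) (out : List (String × Int)) : Prop :=
  out = parse_py_alt lines
instance (lines : List String) (out : List (String × Int)) : Decidable (Spec_parse_py lines out) := by
  unfold Spec_parse_py; infer_instance

-- ===== CLAIM (what is proved, stated in full; the proofs are below) =====
def Claim_equal_parse_py : Prop :=
  ∀ (lines : List String), Dom_parse_py lines → Pre_parse_py lines →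
    Spec_parse_py lines (parse_py lines)

-- ===== LEMMAS AND PROOFS =====

-- the single accumulation step both walks perform: d[k] = d.get(k, 0) + n
def pvAdd (k : String) (n : Int) (d : PySem.Dict String Int) : PySem.Dict String Int :=
  d.insert k (d.getD k 0 + n)

-- Source B's pass 2 as a fold (definitionally the fold inside parse_py_alt)
def pvW (d0 : PySem.Dict String Int) (l : List (String × Int)) : PySem.Dict String Int :=
  l.foldl (fun t e => pvLoopB e.2 e.1.toList t) d0

theorem pvLoopB_eq (n : Int) (p : List Char) (d : PySem.Dict String Int) :
    pvLoopB n p d =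
      if p = ['/'] then pvAdd (String.ofList p) n d
      else if _h : (pvNext p).length < p.length then
        pvLoopB n (pvNext p) (pvAdd (String.ofList p) n d)
      else pvAdd (String.ofList p) n d := by
  rw [pvLoopB]; rfl

theorem pvLoopA_eq (n : Int) (p : List Char) (d : PySem.Dict String Int) :
    pvLoopA n p d =
      if p = ['/'] then pvAdd (String.ofList p) n d
      else if _h : (pvNext p).length < p.length then
        pvLoopA n (pvNext p) (pvAdd (String.ofList p) n d)
      else pvAdd (String.ofList p) n d := by
  rw [pvLoopA]; rfl

theorem pvLoopAB (n : Int) : ∀ (L : Nat) (p : List Char), p.length ≤ L →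
    ∀ d, pvLoopA n p d = pvLoopB n p d := by
  intro L
  induction L with
  | zero =>
    intro p hp d
    rw [pvLoopA_eq, pvLoopB_eq]
    split
    · rfl
    · split
      · omega
      · rfl
  | succ L ih =>
    intro p hp d
    rw [pvLoopA_eq, pvLoopB_eq]
    split
    · rfl
    · split
      · next h => exact ih (pvNext p) (by omega) _
      · rfl

-- two inserts at distinct keys commute when the first key is already present
theorem pvInsert_comm (d : PySem.Dict String Int) (k k' : String) (v v' : Int)
    (hne : k ≠ k') (hck : d.contains k = true) :
    (d.insert k' v').insert k v = (d.insert k v).insert k' v' := by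
  have hb : (k' == k) = false := by simp [Ne.symm hne]
  have hb2 : (k == k') = false := by simp [hne]
  have hck2 : (d.insert k' v').contains k = true := by
    rw [PySem.Dict.contains_insert]; simp [hb2, hck]
  apply PySem.Dict.ext
  by_cases hck' : d.contains k' = true
  · have h1 : (d.insert k v).contains k' = true := by
      rw [PySem.Dict.contains_insert]; simp [hck']
    rw [PySem.Dict.items_insert_of_contains _ v hck2,
        PySem.Dict.items_insert_of_contains _ v' hck',
        PySem.Dict.items_insert_of_contains _ v' h1,
        PySem.Dict.items_insert_of_contains _ v hck,
        List.map_map, List.map_map]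
    apply List.map_congr_left
    intro p _
    by_cases h2 : p.1 = k
    · simp [Function.comp, h2, hb2]
    · by_cases h3 : p.1 = k'
      · simp [Function.comp, h3, hb]
      · simp [Function.comp, h2, h3]
  · have hckf : d.contains k' = false := by simpa using hck'
    have h1 : (d.insert k v).contains k' = false := by
      rw [PySem.Dict.contains_insert]; simp [hb, hckf]
    rw [PySem.Dict.items_insert_of_contains _ v hck2,
        PySem.Dict.items_insert_of_not_contains _ v' hckf,
        PySem.Dict.items_insert_of_not_contains _ v' h1,
        PySem.Dict.items_insert_of_contains _ v hck,
        List.map_append]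
    simp only [List.map_cons, List.map_nil]
    rw [if_neg (by simp [Ne.symm hne])]

theorem pvAdd_comm (k k' : String) (a b : Int) (d : PySem.Dict String Int)
    (hk : k ∈ d.keys) : pvAdd k a (pvAdd k' b d) = pvAdd k' b (pvAdd k a d) := by
  by_cases hkk : k' = k
  · subst hkk
    unfold pvAdd
    rw [PySem.Dict.getD_insert_self, PySem.Dict.getD_insert_self,
        PySem.Dict.insert_insert_self, PySem.Dict.insert_insert_self]
    congr 1
    ring
  · have hck : d.contains k = true := (PySem.Dict.contains_iff_mem_keys d k).mpr hk
    unfold pvAdd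
    rw [PySem.Dict.getD_insert_of_ne _ _ _ (Ne.symm hkk),
        PySem.Dict.getD_insert_of_ne _ _ _ hkk]
    exact pvInsert_comm d k k' _ _ (Ne.symm hkk) hck

theorem pvAdd_add (k : String) (a b : Int) (d : PySem.Dict String Int) :
    pvAdd k a (pvAdd k b d) = pvAdd k (b + a) d := by
  unfold pvAdd
  rw [PySem.Dict.getD_insert_self, PySem.Dict.insert_insert_self]
  congr 1
  ring

theorem pvMem_keys_add (x k : String) (n : Int) (d : PySem.Dict String Int) :
    x ∈ (pvAdd k n d).keys ↔ x = k ∨ x ∈ d.keys := by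
  unfold pvAdd
  exact PySem.Dict.mem_keys_insert d k x _

-- the set of keys a walk from `p` touches
def pvChainK (p : List Char) : List String :=
  String.ofList p ::
    (if p = ['/'] then []
     else if h : (pvNext p).length < p.length then pvChainK (pvNext p) else [])
  termination_by p.length
  decreasing_by exact h

theorem pvKeys_mono_loop (n : Int) : ∀ (L : Nat) (p : List Char), p.length ≤ L →
    ∀ d x, x ∈ PySem.Dict.keys d → x ∈ (pvLoopB n p d).keys := by
  intro L
  induction L with
  | zero =>
    intro p hp d x hx
    rw [pvLoopB_eq]
    split
    · exact (pvMem_keys_add x _ n d).mpr (Or.inr hx)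
    · split
      · omega
      · exact (pvMem_keys_add x _ n d).mpr (Or.inr hx)
  | succ L ih =>
    intro p hp d x hx
    rw [pvLoopB_eq]
    split
    · exact (pvMem_keys_add x _ n d).mpr (Or.inr hx)
    · split
      · next h =>
        exact ih (pvNext p) (by omega) _ x ((pvMem_keys_add x _ n d).mpr (Or.inr hx))
      · exact (pvMem_keys_add x _ n d).mpr (Or.inr hx)

theorem pvChain_sub_keys (n : Int) : ∀ (L : Nat) (p : List Char), p.length ≤ L →
    ∀ d x, x ∈ pvChainK p → x ∈ (pvLoopB n p d).keys := by
  intro L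
  induction L with
  | zero =>
    intro p hp d x hx
    have hpnil : p = [] := List.length_eq_zero_iff.mp (by omega)
    subst hpnil
    rw [pvChainK] at hx
    have h1 : ¬ ([] : List Char) = ['/'] := by simp
    have h2 : ¬ (pvNext []).length < ([] : List Char).length := by simp
    rw [if_neg h1, dif_neg h2] at hx
    rw [pvLoopB_eq, if_neg h1, dif_neg h2]
    simp only [List.mem_singleton] at hx
    subst hx
    exact (pvMem_keys_add _ _ n d).mpr (Or.inl rfl)
  | succ L ih =>
    intro p hp d x hx
    rw [pvChainK] at hx
    rw [pvLoopB_eq]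
    rcases List.mem_cons.mp hx with rfl | hx'
    · split
      · exact (pvMem_keys_add _ _ n d).mpr (Or.inl rfl)
      · split
        · next h =>
          exact pvKeys_mono_loop n L (pvNext p) (by omega) _ _
            ((pvMem_keys_add _ _ n d).mpr (Or.inl rfl))
        · exact (pvMem_keys_add _ _ n d).mpr (Or.inl rfl)
    · by_cases hb : p = ['/']
      · rw [if_pos hb] at hx'
        simp at hx'
      · rw [if_neg hb] at hx'
        rw [if_neg hb]
        by_cases hlt : (pvNext p).length < p.length
        · rw [dif_pos hlt] at hx'
          rw [dif_pos hlt]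
          exact ih (pvNext p) (by omega) _ x hx'
        · rw [dif_neg hlt] at hx'
          simp at hx'

-- a present-key add commutes out of a walk
theorem pvLoop_add_comm (n : Int) : ∀ (L : Nat) (p : List Char), p.length ≤ L →
    ∀ d k b, k ∈ PySem.Dict.keys d →
      pvLoopB n p (pvAdd k b d) = pvAdd k b (pvLoopB n p d) := by
  intro L
  induction L with
  | zero =>
    intro p hp d k b hk
    have hpnil : p = [] := List.length_eq_zero_iff.mp (by omega)
    subst hpnil
    have h1 : ¬ ([] : List Char) = ['/'] := by simp
    have h2 : ¬ (pvNext []).length < ([] : List Char).length := by simp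
    rw [pvLoopB_eq n [] (pvAdd k b d), if_neg h1, dif_neg h2,
        pvLoopB_eq n [] d, if_neg h1, dif_neg h2]
    exact (pvAdd_comm k _ b n d hk).symm
  | succ L ih =>
    intro p hp d k b hk
    rw [pvLoopB_eq n p (pvAdd k b d), pvLoopB_eq n p d]
    by_cases hb : p = ['/']
    · rw [if_pos hb, if_pos hb]
      exact (pvAdd_comm k _ b n d hk).symm
    · rw [if_neg hb, if_neg hb]
      by_cases hlt : (pvNext p).length < p.length
      · rw [dif_pos hlt, dif_pos hlt]
        rw [(pvAdd_comm k _ b n d hk).symm]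
        exact ih (pvNext p) (by omega) _ k b ((pvMem_keys_add k _ n d).mpr (Or.inr hk))
      · rw [dif_neg hlt, dif_neg hlt]
        exact (pvAdd_comm k _ b n d hk).symm

-- two walks along the same path fuse
theorem pvLoop_loop_same (b1 b2 : Int) : ∀ (L : Nat) (p : List Char), p.length ≤ L →
    ∀ d, pvLoopB b2 p (pvLoopB b1 p d) = pvLoopB (b1 + b2) p d := by
  intro L
  induction L with
  | zero =>
    intro p hp d
    have hpnil : p = [] := List.length_eq_zero_iff.mp (by omega)
    subst hpnil
    have h1 : ¬ ([] : List Char) = ['/'] := by simp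
    have h2 : ¬ (pvNext []).length < ([] : List Char).length := by simp
    rw [pvLoopB_eq b1, if_neg h1, dif_neg h2, pvLoopB_eq b2, if_neg h1, dif_neg h2,
        pvLoopB_eq (b1 + b2), if_neg h1, dif_neg h2]
    exact pvAdd_add _ b2 b1 d
  | succ L ih =>
    intro p hp d
    by_cases hb : p = ['/']
    · rw [pvLoopB_eq b1, if_pos hb, pvLoopB_eq b2, if_pos hb, pvLoopB_eq (b1 + b2), if_pos hb]
      exact pvAdd_add _ b2 b1 d
    · by_cases hlt : (pvNext p).length < p.length
      · rw [pvLoopB_eq b1, if_neg hb, dif_pos hlt,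
            pvLoopB_eq b2 p, if_neg hb, dif_pos hlt,
            pvLoopB_eq (b1 + b2), if_neg hb, dif_pos hlt]
        have hc : String.ofList p ∈ PySem.Dict.keys (pvAdd (String.ofList p) b1 d) :=
          (pvMem_keys_add _ _ b1 d).mpr (Or.inl rfl)
        rw [(pvLoop_add_comm b1 (pvNext p).length (pvNext p) le_rfl
              (pvAdd (String.ofList p) b1 d) _ b2 hc).symm,
            pvAdd_add _ b2 b1 d]
        exact ih (pvNext p) (by omega) _
      · rw [pvLoopB_eq b1, if_neg hb, dif_neg hlt, pvLoopB_eq b2 p, if_neg hb, dif_neg hlt,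
            pvLoopB_eq (b1 + b2), if_neg hb, dif_neg hlt]
        exact pvAdd_add _ b2 b1 d

-- a walk whose chain is already present commutes with any other walk
theorem pvLoop_loop_comm (n b : Int) : ∀ (L : Nat) (p : List Char), p.length ≤ L →
    ∀ (q : List Char) d, (∀ x ∈ pvChainK p, x ∈ PySem.Dict.keys d) →
      pvLoopB n p (pvLoopB b q d) = pvLoopB b q (pvLoopB n p d) := by
  intro L
  induction L with
  | zero =>
    intro p hp q d hchain
    have hpnil : p = [] := List.length_eq_zero_iff.mp (by omega)
    subst hpnil
    have h1 : ¬ ([] : List Char) = ['/'] := by simp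
    have h2 : ¬ (pvNext []).length < ([] : List Char).length := by simp
    have hc : String.ofList ([] : List Char) ∈ PySem.Dict.keys d := by
      apply hchain
      rw [pvChainK]
      exact List.mem_cons_self ..
    rw [pvLoopB_eq n, if_neg h1, dif_neg h2, pvLoopB_eq n, if_neg h1, dif_neg h2]
    exact (pvLoop_add_comm b q.length q le_rfl d _ n hc).symm
  | succ L ih =>
    intro p hp q d hchain
    have hc : String.ofList p ∈ PySem.Dict.keys d := by
      apply hchain
      rw [pvChainK]
      exact List.mem_cons_self ..
    by_cases hb : p = ['/']
    · rw [pvLoopB_eq n p, if_pos hb, pvLoopB_eq n p, if_pos hb]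
      exact (pvLoop_add_comm b q.length q le_rfl d _ n hc).symm
    · by_cases hlt : (pvNext p).length < p.length
      · rw [pvLoopB_eq n p, if_neg hb, dif_pos hlt, pvLoopB_eq n p, if_neg hb, dif_pos hlt]
        rw [(pvLoop_add_comm b q.length q le_rfl d _ n hc).symm]
        apply ih (pvNext p) (by omega) q
        intro x hx
        apply (pvMem_keys_add x _ n d).mpr
        right
        apply hchain
        rw [pvChainK, if_neg hb, dif_pos hlt]
        exact List.mem_cons_of_mem _ hx
      · rw [pvLoopB_eq n p, if_neg hb, dif_neg hlt, pvLoopB_eq n p, if_neg hb, dif_neg hlt]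
        exact (pvLoop_add_comm b q.length q le_rfl d _ n hc).symm

-- … and hence with a whole pass-2 fold
theorem pvLoop_fold_comm (n : Int) (p : List Char) :
    ∀ (l : List (String × Int)) (d : PySem.Dict String Int),
      (∀ x ∈ pvChainK p, x ∈ PySem.Dict.keys d) →
      pvW (pvLoopB n p d) l = pvLoopB n p (pvW d l) := by
  intro l
  induction l with
  | nil => intro d _; rfl
  | cons e t ih =>
    intro d hchain
    simp only [pvW, List.foldl_cons]
    rw [← pvLoop_loop_comm n e.2 p.length p le_rfl e.1.toList d hchain]
    exact ih _ (fun x hx => pvKeys_mono_loop e.2 e.1.toList.length e.1.toList le_rfl d x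
      (hchain x hx))

-- bumping one entry of the direct dict = running one more walk after the whole pass 2
theorem pvBump (cs : List Char) (n : Int) (dir : PySem.Dict String Int)
    (hnd : dir.keys.Nodup) (d0 : PySem.Dict String Int) :
    pvW d0 (pvAdd (String.ofList cs) n dir).items = pvLoopB n cs (pvW d0 dir.items) := by
  have hct : (String.ofList cs).toList = cs := by simp
  by_cases hck : dir.contains (String.ofList cs) = true
  · obtain ⟨m, hm⟩ : ∃ v, (String.ofList cs, v) ∈ dir.items := by
      have hkmem : String.ofList cs ∈ dir.items.map Prod.fst :=
        (PySem.Dict.contains_iff_mem_keys _ _).mp hck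
      rcases List.mem_map.mp hkmem with ⟨q, hq, hfst⟩
      exact ⟨q.2, by rwa [show (String.ofList cs, q.2) = q from Prod.ext hfst.symm rfl]⟩
    obtain ⟨l₁, l₂, hsplit⟩ := List.append_of_mem hm
    have hgd : dir.getD (String.ofList cs) 0 = m := PySem.Dict.getD_of_mem_items dir hm hnd 0
    have hnd' : (l₁.map Prod.fst ++ String.ofList cs :: l₂.map Prod.fst).Nodup := by
      have := hnd
      rw [show PySem.Dict.keys dir = dir.items.map Prod.fst from rfl, hsplit,
          List.map_append, List.map_cons] at this
      exact this
    have h1 : String.ofList cs ∉ l₁.map Prod.fst := by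
      intro hmem
      exact (List.disjoint_of_nodup_append hnd') hmem (List.mem_cons_self ..)
    have h2 : String.ofList cs ∉ l₂.map Prod.fst :=
      (List.nodup_cons.mp (List.nodup_append.mp hnd').2.1).1
    have hmapid : ∀ (l : List (String × Int)), String.ofList cs ∉ l.map Prod.fst →
        l.map (fun q => if (q.1 == String.ofList cs) = true
          then (String.ofList cs, dir.getD (String.ofList cs) 0 + n) else q) = l := by
      intro l hl
      have : ∀ q ∈ l, (if (q.1 == String.ofList cs) = true
          then (String.ofList cs, dir.getD (String.ofList cs) 0 + n) else q) = q := by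
        intro q hq
        rw [if_neg]
        simp only [beq_iff_eq]
        intro hqe
        exact hl (hqe ▸ List.mem_map_of_mem hq)
      rw [List.map_congr_left this]
      simp
    have hit : (pvAdd (String.ofList cs) n dir).items = l₁ ++ (String.ofList cs, m + n) :: l₂ := by
      unfold pvAdd
      rw [PySem.Dict.items_insert_of_contains _ _ hck, hsplit, List.map_append, List.map_cons,
          hmapid l₁ h1, hmapid l₂ h2]
      simp [hgd]
    rw [hit, hsplit]
    unfold pvW
    rw [List.foldl_append, List.foldl_append, List.foldl_cons, List.foldl_cons]
    simp only [hct]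
    rw [← pvLoop_loop_same m n cs.length cs le_rfl]
    exact pvLoop_fold_comm n cs l₂ _
      (fun x hx => pvChain_sub_keys m cs.length cs le_rfl _ x hx)
  · have hckf : dir.contains (String.ofList cs) = false := by simpa using hck
    have hit : (pvAdd (String.ofList cs) n dir).items = dir.items ++ [(String.ofList cs, 0 + n)] := by
      unfold pvAdd
      rw [PySem.Dict.getD_of_not_contains _ _ hckf, PySem.Dict.items_insert_of_not_contains _ _ hckf]
    rw [hit]
    unfold pvW
    rw [List.foldl_append, List.foldl_cons, List.foldl_nil]
    simp only [hct, zero_add]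

theorem pvMain : ∀ (lines : List String) (cs : List Char) (dir : PySem.Dict String Int),
    dir.keys.Nodup →
    lines.foldl pvStepA (cs, pvW PySem.Dict.empty dir.items) =
      ((lines.foldl pvStepB (cs, dir)).1,
       pvW PySem.Dict.empty (lines.foldl pvStepB (cs, dir)).2.items) := by
  intro lines
  induction lines with
  | nil => intro cs dir _; rfl
  | cons l t ih =>
    intro cs dir hnd
    simp only [List.foldl_cons]
    cases hcl : pvClass (PySem.Str.split₀ l) with
    | cd t' =>
      simp only [pvStepA, pvStepB, hcl]
      exact ih (pvCd cs t') dir hnd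
    | blank =>
      simp only [pvStepA, pvStepB, hcl]
      exact ih cs dir hnd
    | file sz =>
      simp only [pvStepA, pvStepB, hcl]
      cases hof : PySem.Int.ofStr? sz with
      | none => exact ih cs dir hnd
      | some n =>
        simp only []
        have hA : pvLoopA n cs (pvW PySem.Dict.empty dir.items) =
            pvW PySem.Dict.empty (pvAdd (String.ofList cs) n dir).items := by
          rw [pvLoopAB n cs.length cs le_rfl, pvBump cs n dir hnd]
        rw [hA]
        exact ih cs (pvAdd (String.ofList cs) n dir)
          (PySem.Dict.nodup_keys_insert _ _ _ hnd)

-- ===== VERDICT (by name: the statement is the Claim_ definition above) =====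
theorem parse_py_spec : Claim_equal_parse_py := by
  intro lines _ _
  unfold Spec_parse_py parse_py parse_py_alt
  have h := pvMain lines ['/'] PySem.Dict.empty PySem.Dict.nodup_keys_empty
  have h0 : pvW PySem.Dict.empty (PySem.Dict.empty : PySem.Dict String Int).items =
      PySem.Dict.empty := rfl
  rw [h0] at h
  rw [h]
  rfl
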